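-- pv_equiv track=rewrite | github.com/lawson-gilles-cyber/cyber-project-21-threat-intelligence-platform | core/analyzer.py | analyze_logs
-- ===== SOURCE A (Python) =====
-- def analyze_logs(logs, iocs):
--
--     alerts = []
--
--     for log in logs:
--         log = log.strip()
--
--         for ioc in iocs:
--             if ioc in log:
--                 alerts.append(f"[TIP ALERT] IOC match detected: {ioc}")
--
--     return alerts
-- ===== SOURCE B (Python) =====
-- def analyze_logs(logs, iocs):
--     stripped = [log.strip() for log in logs]
--     buckets = [[] for _ in stripped]
--     for ioc in iocs:
--         msg = f"[TIP ALERT] IOC match detected: {ioc}"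
--         for i, s in enumerate(stripped):
--             if ioc in s:
--                 buckets[i].append(msg)
--     alerts = []
--     for bucket in buckets:
--         alerts.extend(bucket)
--     return alerts
-- ===== Notes on version B (the rewrite author's own statement) =====
-- stated objective: alternative
-- what changed: B transposes A's loop nest: it scans the stripped logs once per IOC, appending matches into per-log buckets, and concatenates the buckets at the end, instead of A's per-log inner loop over all IOCs.
import Mathlib
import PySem

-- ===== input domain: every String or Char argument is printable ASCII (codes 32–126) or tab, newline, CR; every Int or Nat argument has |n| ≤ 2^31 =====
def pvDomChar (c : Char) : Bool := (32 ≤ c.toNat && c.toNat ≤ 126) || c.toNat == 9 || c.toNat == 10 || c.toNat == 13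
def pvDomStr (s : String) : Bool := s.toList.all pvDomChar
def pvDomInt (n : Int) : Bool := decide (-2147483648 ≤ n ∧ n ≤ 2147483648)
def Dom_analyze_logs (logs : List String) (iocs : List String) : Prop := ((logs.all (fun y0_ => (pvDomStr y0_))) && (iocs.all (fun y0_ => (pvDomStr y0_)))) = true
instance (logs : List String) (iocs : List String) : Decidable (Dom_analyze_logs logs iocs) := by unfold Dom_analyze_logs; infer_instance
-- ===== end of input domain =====

-- B transposes A's loops: it scans the logs once per IOC, collecting matches into per-log
-- buckets, then concatenates the buckets (alternative traversal order, same results).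

-- ===== PORT A =====
def analyze_logs (logs : List String) (iocs : List String) : List String :=
  logs.foldl (fun alerts log =>
    let s := PySem.Str.strip log
    iocs.foldl (fun alerts ioc =>
      if PySem.Str.isIn ioc s then alerts ++ ["[TIP ALERT] IOC match detected: " ++ ioc]
      else alerts) alerts) []

-- ===== PORT B =====
def analyze_logs_alt (logs : List String) (iocs : List String) : List String :=
  let stripped := logs.map PySem.Str.strip
  let buckets := iocs.foldl (fun buckets ioc =>
      let msg := "[TIP ALERT] IOC match detected: " ++ ioc
      List.zipWith (fun bucket s => if PySem.Str.isIn ioc s then bucket ++ [msg] else bucket)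
        buckets stripped)
    (stripped.map (fun _ => ([] : List String)))
  buckets.foldl (fun alerts bucket => alerts ++ bucket) []

-- ===== PRECONDITION & SPEC =====
def Spec_analyze_logs (logs : List String) (iocs : List String) (out : List String) : Prop := out = analyze_logs_alt logs iocs
instance (logs : List String) (iocs : List String) (out : List String) : Decidable (Spec_analyze_logs logs iocs out) := by unfold Spec_analyze_logs; infer_instance

-- ===== CLAIM (what is proved, stated in full; the proofs are below) =====
def Claim_equal_analyze_logs : Prop := ∀ (logs : List String) (iocs : List String), Dom_analyze_logs logs iocs → Spec_analyze_logs logs iocs (analyze_logs logs iocs)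

-- ===== LEMMAS AND PROOFS =====

-- composing a zipWith step with an accumulated zipWith over the same right list
theorem pv_zipWith_comp {α β γ δ : Type} (f : γ → β → δ) (g : α → β → γ) :
    ∀ (b : List α) (s : List β),
      List.zipWith f (List.zipWith g b s) s = List.zipWith (fun x y => f (g x y) y) b s := by
  intro b
  induction b with
  | nil => intro s; simp
  | cons a b ih =>
    intro s
    cases s with
    | nil => simp
    | cons c s => simp [ih]

-- pointwise-equal functions give equal zipWith
theorem pv_zipWith_congr {α β γ : Type} (f g : α → β → γ)
    (h : ∀ x y, f x y = g x y) :
    ∀ (b : List α) (s : List β), List.zipWith f b s = List.zipWith g b s := by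
  intro b
  induction b with
  | nil => intro s; simp
  | cons a b ih =>
    intro s
    cases s with
    | nil => simp
    | cons c s => simp [h, ih]

-- zipWith that ignores its second list is the identity when the lengths agree
theorem pv_zipWith_id_of_length {α β : Type} :
    ∀ (b : List α) (s : List β), b.length = s.length →
      List.zipWith (fun x _ => x) b s = b := by
  intro b
  induction b with
  | nil => intro s _; simp
  | cons a b ih =>
    intro s h
    cases s with
    | nil => simp at h
    | cons c s => simp at h; simp [ih s h]

-- the transposed IOC loop fills each bucket with exactly the per-log filtered messages
theorem pv_buckets (stripped : List String) :
    ∀ (iocs : List String) (b : List (List String)), b.length = stripped.length →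
      iocs.foldl (fun buckets ioc =>
          List.zipWith (fun bucket s =>
            if PySem.Str.isIn ioc s then bucket ++ ["[TIP ALERT] IOC match detected: " ++ ioc]
            else bucket) buckets stripped) b =
        List.zipWith (fun bucket s =>
          bucket ++ (iocs.filter (fun ioc => PySem.Str.isIn ioc s)).map
            (fun ioc => "[TIP ALERT] IOC match detected: " ++ ioc)) b stripped := by
  intro iocs
  induction iocs with
  | nil =>
    intro b hb
    simp only [List.foldl_nil, List.filter_nil, List.map_nil, List.append_nil]
    exact (pv_zipWith_id_of_length b stripped hb).symm
  | cons a iocs ih =>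
    intro b hb
    rw [List.foldl_cons,
      ih _ (by simp [List.length_zipWith, hb]),
      pv_zipWith_comp]
    apply pv_zipWith_congr
    intro x y
    simp only [List.filter_cons]
    split_ifs <;> simp

-- folding ++ over a list of lists is flatten
theorem pv_foldl_flatten {α : Type} :
    ∀ (l : List (List α)) (init : List α),
      l.foldl (fun a b => a ++ b) init = init ++ l.flatten := by
  intro l
  induction l with
  | nil => intro init; simp
  | cons a l ih => intro init; simp [ih]

-- zipWith against the map of the same list collapses to a map
theorem pv_zipWith_map_self {α β γ : Type} (f : β → α → γ) (g : α → β) :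
    ∀ (l : List α), List.zipWith f (l.map g) l = l.map (fun x => f (g x) x) := by
  intro l
  induction l with
  | nil => simp
  | cons a l ih => simp [ih]

-- ===== VERDICT (by name: the statement is the Claim_ definition above) =====
theorem analyze_logs_spec : Claim_equal_analyze_logs := by
  intro logs iocs _
  unfold Spec_analyze_logs
  simp only [analyze_logs, analyze_logs_alt]
  rw [pv_foldl_flatten, pv_buckets _ _ _ (by simp), pv_zipWith_map_self, List.nil_append]
  calc logs.foldl (fun alerts log =>
          iocs.foldl (fun alerts ioc =>
            if PySem.Str.isIn ioc (PySem.Str.strip log) then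
              alerts ++ ["[TIP ALERT] IOC match detected: " ++ ioc]
            else alerts) alerts) []
      = logs.foldl (fun alerts log =>
          alerts ++ (iocs.filter (fun ioc => PySem.Str.isIn ioc (PySem.Str.strip log))).map
            (fun ioc => "[TIP ALERT] IOC match detected: " ++ ioc)) [] := by
        apply PySem.List.foldl_congr_mem
        intro acc x _
        exact PySem.List.foldl_append_if _ _ iocs acc
    _ = logs.flatMap (fun log =>
          (iocs.filter (fun ioc => PySem.Str.isIn ioc (PySem.Str.strip log))).map
            (fun ioc => "[TIP ALERT] IOC match detected: " ++ ioc)) := by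
        rw [PySem.List.foldl_append_eq_flatMap]; simp
    _ = _ := by rw [List.map_map]; simp [List.flatMap_def, Function.comp_def, PySem.Str.strip]
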